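-- pv_equiv track=rewrite | github.com/grapheneaffiliate/h4-polytopic-attention | solve_arc2_train_ac.py | solve_5ad8a7c0
-- ===== SOURCE A (Python) =====
-- def solve_5ad8a7c0(grid):
--     """Diamond of 2s: fill between 2s on rows where gap equals neighbor row gaps"""
--     R, C = len(grid), len(grid[0])
--     out = [row[:] for row in grid]
--     # Get left/right positions of 2s per row
--     row_info = []
--     for r in range(R):
--         positions = [c for c in range(C) if grid[r][c] == 2]
--         if len(positions) >= 2:
--             row_info.append((r, positions[0], positions[-1]))
--         else:
--             row_info.append((r, -1, -1))
--
--     # Fill row if it has a "concave" section relative to the diamond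
--     # Fill between 2s if the gap does NOT monotonically change (flat section)
--     for i, (r, left, right) in enumerate(row_info):
--         if left < 0:
--             continue
--         gap = right - left
--         # Check neighbors: if adjacent row has same gap, fill both
--         fill = False
--         for j, (r2, l2, r2r) in enumerate(row_info):
--             if j == i:
--                 continue
--             if l2 >= 0 and abs(j - i) == 1:
--                 gap2 = r2r - l2
--                 if gap == gap2:
--                     fill = True
--                     break
--         if fill:
--             for c in range(left, right + 1):
--                 out[r][c] = 2
--
--     return out
-- ===== SOURCE B (Python) =====
-- def solve_5ad8a7c0(grid):
--     """Diamond of 2s: fill between 2s on rows where gap equals neighbor row gaps"""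
--     R, C = len(grid), len(grid[0])
--     # pass 1: per row, first/last column holding a 2 in a single sweep (span only if >= two 2s)
--     spans = []
--     for row in grid:
--         first = last = None
--         for c, v in enumerate(row[:C]):
--             if v == 2:
--                 if first is None:
--                     first = c
--                 last = c
--         spans.append((first, last) if first is not None and first != last else None)
--     # pass 2: one sweep over consecutive pairs; an equal-gap adjacent pair marks both rows
--     marks = [False] * R
--     for i in range(R - 1):
--         a, b = spans[i], spans[i + 1]
--         if a is not None and b is not None and a[1] - a[0] == b[1] - b[0]:
--             marks[i] = marks[i + 1] = True
--     # pass 3: build the output rows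
--     out = []
--     for i, row in enumerate(grid):
--         if marks[i]:
--             l, r = spans[i]
--             out.append([2 if l <= c <= r else v for c, v in enumerate(row)])
--         else:
--             out.append(row[:])
--     return out
-- ===== Notes on version B (the rewrite author's own statement) =====
-- stated objective: alternative
-- what changed: B replaces A's per-row inner scan of all rows by three staged linear passes: a single first/last sweep per row (no position list), then one sweep over consecutive row pairs that marks both rows of an equal-gap pair in a boolean array, then a separate output-building pass from the marks.
import Mathlib
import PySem

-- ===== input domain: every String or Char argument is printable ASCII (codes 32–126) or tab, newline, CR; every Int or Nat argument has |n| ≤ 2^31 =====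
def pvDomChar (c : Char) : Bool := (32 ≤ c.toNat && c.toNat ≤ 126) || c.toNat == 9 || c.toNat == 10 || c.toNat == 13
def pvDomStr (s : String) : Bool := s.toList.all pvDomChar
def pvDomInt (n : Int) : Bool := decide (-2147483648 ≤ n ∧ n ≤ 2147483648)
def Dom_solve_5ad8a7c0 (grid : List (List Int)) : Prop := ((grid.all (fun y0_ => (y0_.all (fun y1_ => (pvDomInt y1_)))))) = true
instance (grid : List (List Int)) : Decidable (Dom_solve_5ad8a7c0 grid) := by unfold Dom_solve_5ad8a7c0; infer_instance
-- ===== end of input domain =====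

-- B replaces A's per-row inner scan over all rows by three staged linear passes: a single
-- first/last sweep per row (no position list), one sweep over consecutive row pairs marking
-- both rows of an equal-gap pair in a boolean array, and a separate output-building pass.
-- (A mutates a fresh copy, not its argument.)

-- ===== PORT A =====
-- literal port: out[r][c] = 2 is List.modify/List.set at the (nonnegative, in-range under Pre_) indices
def solve_5ad8a7c0 (grid : List (List Int)) : List (List Int) :=
  let R := grid.length
  let C := (PySem.List.pyGetD grid 0 []).length
  let out := grid
  let row_info : List (Int × Int × Int) :=
    (PySem.List.pyRange 0 (R : Int) 1).foldl (fun ri r =>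
      let positions := (PySem.List.pyRange 0 (C : Int) 1).filter
        (fun c => PySem.List.pyGetD (PySem.List.pyGetD grid r []) c 0 == 2)
      if positions.length ≥ 2 then
        ri ++ [(r, positions.headD 0, positions.getLastD 0)]
      else
        ri ++ [(r, (-1 : Int), (-1 : Int))]) []
  (PySem.List.enumerate row_info).foldl (fun out ie =>
    if ie.2.2.1 < 0 then out
    else
      let gap := ie.2.2.2 - ie.2.2.1
      let fill := (PySem.List.enumerate row_info).any (fun je =>
        !(je.1 == ie.1) && decide (je.2.2.1 ≥ 0) && ((je.1 - ie.1).natAbs == 1) &&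
          (gap == je.2.2.2 - je.2.2.1))
      if fill then
        (PySem.List.pyRange ie.2.2.1 (ie.2.2.2 + 1) 1).foldl
          (fun out c => out.modify ie.2.1.toNat (fun row => row.set c.toNat 2)) out
      else out) out

-- ===== PORT B =====
-- pass 1 body: 'first = last = None; for c, v in enumerate(row[:C]): if v == 2: …'
def pvB_scan (C : Nat) (row : List Int) : Option (Int × Int) :=
  let st := (PySem.List.enumerate (PySem.List.slice row none (some (C : Int)))).foldl
    (fun st cv => if cv.2 == 2 then
        match st with
        | none => some (cv.1, cv.1)
        | some fl => some (fl.1, cv.1)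
      else st) none
  match st with
  | some fl => if fl.1 != fl.2 then some fl else none
  | none => none

def solve_5ad8a7c0_alt (grid : List (List Int)) : List (List Int) :=
  let R := grid.length
  let C := (PySem.List.pyGetD grid 0 []).length
  let spans := grid.foldl (fun acc row => acc ++ [pvB_scan C row]) []
  let marks := (PySem.List.pyRange 0 ((R : Int) - 1) 1).foldl (fun m i =>
    match PySem.List.pyGetD spans i none, PySem.List.pyGetD spans (i + 1) none with
    | some a, some b =>
        if a.2 - a.1 == b.2 - b.1 then (m.set i.toNat true).set (i.toNat + 1) true else m
    | _, _ => m) (List.replicate R false)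
  (PySem.List.enumerate grid).foldl (fun out ir =>
    if PySem.List.pyGetD marks ir.1 false then
      match PySem.List.pyGetD spans ir.1 none with
      | some lr => out ++ [(PySem.List.enumerate ir.2).map
          (fun cv => if lr.1 ≤ cv.1 ∧ cv.1 ≤ lr.2 then (2 : Int) else cv.2)]
      | none => out ++ [ir.2]  -- unreachable: a marked row has a span ('l, r = spans[i]')
    else out ++ [ir.2]) []

-- ===== PRECONDITION & SPEC =====
-- Pre_ excludes exactly the inputs where Python A raises IndexError: the empty grid (grid[0])
-- and grids with a row shorter than len(grid[0]) (grid[r][c] for c in range(C)).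
def Pre_solve_5ad8a7c0 (grid : List (List Int)) : Prop :=
  grid ≠ [] ∧ ∀ row ∈ grid, (PySem.List.pyGetD grid 0 []).length ≤ row.length
instance (grid : List (List Int)) : Decidable (Pre_solve_5ad8a7c0 grid) := by
  unfold Pre_solve_5ad8a7c0; infer_instance
def pvWitness_solve_5ad8a7c0 : List (List Int) := [[2, 0, 2], [2, 0, 2], [0, 0, 0]]

def Spec_solve_5ad8a7c0 (grid : List (List Int)) (out : List (List Int)) : Prop :=
  out = solve_5ad8a7c0_alt grid
instance (grid : List (List Int)) (out : List (List Int)) : Decidable (Spec_solve_5ad8a7c0 grid out) := by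
  unfold Spec_solve_5ad8a7c0; infer_instance

-- ===== CLAIM (what is proved, stated in full; the proofs are below) =====
def Claim_equal_solve_5ad8a7c0 : Prop := ∀ (grid : List (List Int)), Dom_solve_5ad8a7c0 grid → Pre_solve_5ad8a7c0 grid → Spec_solve_5ad8a7c0 grid (solve_5ad8a7c0 grid)

-- ===== LEMMAS AND PROOFS =====

-- A's span of a row, through the filtered position list
def pvB_span (C : Nat) (row : List Int) : Option (Int × Int) :=
  let ps := (PySem.List.pyRange 0 (C : Int) 1).filter
    (fun c => PySem.List.pyGetD row c 0 == 2)
  if ps.length ≥ 2 then some (ps.headD 0, ps.getLastD 0) else none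

-- A's row_info entry for row index r, expressed through pvB_span
def pvEntry (grid : List (List Int)) (r : Int) : Int × Int × Int :=
  match pvB_span (PySem.List.pyGetD grid 0 []).length (PySem.List.pyGetD grid r []) with
  | some lr => (r, lr.1, lr.2)
  | none => (r, -1, -1)

def pvInfoA (grid : List (List Int)) : List (Int × Int × Int) :=
  (PySem.List.pyRange 0 (grid.length : Int) 1).map (pvEntry grid)

-- A's 'fill' flag for row i with gap g
def pvFill (grid : List (List Int)) (i g : Int) : Bool :=
  (PySem.List.enumerate (pvInfoA grid)).any (fun je =>
    !(je.1 == i) && decide (je.2.2.1 ≥ 0) && ((je.1 - i).natAbs == 1) &&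
      (g == je.2.2.2 - je.2.2.1))

-- the whole effect of A's loop body on row e.1 = i
def pvUpd (grid : List (List Int)) (i : Int) (e : Int × Int × Int) (row : List Int) : List Int :=
  if e.2.1 < 0 then row
  else if pvFill grid i (e.2.2 - e.2.1) then
    (PySem.List.pyRange e.2.1 (e.2.2 + 1) 1).foldl (fun row c => row.set c.toNat 2) row
  else row

theorem pv_modify_id {α : Type} (l : List α) (k : Nat) : l.modify k (fun x => x) = l := by
  apply List.ext_getElem?
  intro p
  simp [List.getElem?_modify]

-- repeated in-place writes to the same row collapse to one modify
theorem pv_foldl_modify_same {α β : Type} (cs : List β) (k : Nat)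
    (g : β → α → α) (o : List α) :
    cs.foldl (fun o c => o.modify k (g c)) o
      = o.modify k (fun row => cs.foldl (fun row c => g c row) row) := by
  induction cs generalizing o with
  | nil => simp [pv_modify_id]
  | cons c cs ih =>
      simp only [List.foldl_cons]
      rw [ih]
      apply List.ext_getElem?
      intro p
      simp only [List.getElem?_modify]
      by_cases hk : k = p
      · simp only [hk, if_pos]
        cases o[p]? <;> rfl
      · simp [hk]

-- a fold of per-index modifications over an enumerated list, read back elementwise
theorem pv_foldl_enum_modify {α E : Type} (f : Int → E → α → α) :
    ∀ (es : List E) (s : Nat) (o : List α) (p : Nat),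
    ((PySem.List.enumerate es (s : Int)).foldl
        (fun o ie => o.modify ie.1.toNat (f ie.1 ie.2)) o)[p]?
      = if h : s ≤ p ∧ p - s < es.length then o[p]?.map (f (p : Int) es[p - s]) else o[p]? := by
  intro es
  induction es with
  | nil => intro s o p; simp [PySem.List.enumerate_nil]
  | cons e t ih =>
      intro s o p
      rw [PySem.List.enumerate_cons]
      have hs1 : (s : Int) + 1 = ((s + 1 : Nat) : Int) := by push_cast; ring
      simp only [List.foldl_cons, hs1]
      rw [ih (s + 1) (o.modify (s : Int).toNat (f (s : Int) e)) p]
      by_cases hps : p = s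
      · subst hps
        have : ¬ (p + 1 ≤ p ∧ p - (p + 1) < t.length) := by omega
        rw [dif_neg this]
        have h3 : p ≤ p ∧ p - p < (e :: t).length := by simp
        rw [dif_pos h3]
        simp only [List.getElem?_modify, Int.toNat_natCast]
        simp
      · by_cases h2 : s + 1 ≤ p ∧ p - (s + 1) < t.length
        · rw [dif_pos h2]
          have h3 : s ≤ p ∧ p - s < (e :: t).length := by simp; omega
          rw [dif_pos h3]
          have hg : (e :: t)[p - s] = t[p - (s + 1)] := by
            have : p - s = (p - (s + 1)) + 1 := by omega
            simp [this]
          rw [hg]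
          simp only [List.getElem?_modify, Int.toNat_natCast]
          have : ¬ s = p := by omega
          simp [this]
        · rw [dif_neg h2]
          have h3 : ¬ (s ≤ p ∧ p - s < (e :: t).length) := by simp; omega
          rw [dif_neg h3]
          simp only [List.getElem?_modify, Int.toNat_natCast]
          have : ¬ s = p := by omega
          simp [this]

theorem pv_rowinfo_eq (grid : List (List Int)) :
    ((PySem.List.pyRange 0 (grid.length : Int) 1).foldl (fun ri r =>
      let positions := (PySem.List.pyRange 0 ((PySem.List.pyGetD grid 0 []).length : Int) 1).filter
        (fun c => PySem.List.pyGetD (PySem.List.pyGetD grid r []) c 0 == 2)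
      if positions.length ≥ 2 then
        ri ++ [(r, positions.headD 0, positions.getLastD 0)]
      else
        ri ++ [(r, (-1 : Int), (-1 : Int))]) [])
      = pvInfoA grid := by
  have h : ∀ (acc : List (Int × Int × Int)) (r : Int),
      (let positions := (PySem.List.pyRange 0 ((PySem.List.pyGetD grid 0 []).length : Int) 1).filter
        (fun c => PySem.List.pyGetD (PySem.List.pyGetD grid r []) c 0 == 2)
      if positions.length ≥ 2 then
        acc ++ [(r, positions.headD 0, positions.getLastD 0)]
      else
        acc ++ [(r, (-1 : Int), (-1 : Int))])
      = acc ++ [pvEntry grid r] := by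
    intro acc r
    simp only [pvEntry, pvB_span]
    split_ifs with h1 <;> simp
  calc _ = (PySem.List.pyRange 0 (grid.length : Int) 1).foldl
        (fun acc r => acc ++ [pvEntry grid r]) [] := by
        apply PySem.List.foldl_congr_mem
        intro acc r _
        exact h acc r
    _ = pvInfoA grid := by
        rw [PySem.List.foldl_append_singleton_eq_map]
        rfl

theorem pv_infoA_length (grid : List (List Int)) : (pvInfoA grid).length = grid.length := by
  simp [pvInfoA, PySem.List.length_pyRange_one]

theorem pv_infoA_getElem (grid : List (List Int)) (k : Nat) (hk : k < (pvInfoA grid).length) :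
    (pvInfoA grid)[k] = pvEntry grid (k : Int) := by
  simp [pvInfoA, PySem.List.getElem_pyRange_one]

theorem pv_entry_fst (grid : List (List Int)) (r : Int) : (pvEntry grid r).1 = r := by
  unfold pvEntry
  rcases pvB_span (PySem.List.pyGetD grid 0 []).length (PySem.List.pyGetD grid r []) with _ | lr <;> rfl

theorem pv_span_nonneg (C : Nat) (row : List Int) (l rt : Int)
    (h : pvB_span C row = some (l, rt)) : 0 ≤ l ∧ 0 ≤ rt := by
  unfold pvB_span at h
  set ps := (PySem.List.pyRange 0 (C : Int) 1).filter (fun c => PySem.List.pyGetD row c 0 == 2) with hps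
  by_cases h2 : ps.length ≥ 2
  · rw [if_pos h2] at h
    have hne : ps ≠ [] := by
      intro hnil; rw [hnil] at h2; simp at h2
    have hmemh : ps.headD 0 ∈ ps := by
      rw [List.headD_eq_head?, List.head?_eq_head hne]
      exact List.head_mem hne
    have hmeml : ps.getLastD 0 ∈ ps := by
      rw [List.getLastD_eq_getLast?, List.getLast?_eq_some_getLast hne]
      exact List.getLast_mem hne
    have hh : ∀ x ∈ ps, 0 ≤ x := by
      intro x hx
      rw [hps] at hx
      have := List.mem_filter.mp hx
      exact ((PySem.List.mem_pyRange_one).mp this.1).1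
    injection h with h'
    injection h' with h1 h2'
    constructor
    · rw [← h1]; exact hh _ hmemh
    · rw [← h2']; exact hh _ hmeml
  · rw [if_neg h2] at h; exact absurd h (by simp)

-- A's result, row by row
theorem pv_A_getElem? (grid : List (List Int)) (p : Nat) :
    (solve_5ad8a7c0 grid)[p]? =
      if _ : p < grid.length then
        grid[p]?.map (pvUpd grid (p : Int) (pvEntry grid (p : Int)))
      else grid[p]? := by
  have hA : solve_5ad8a7c0 grid =
      (PySem.List.enumerate (pvInfoA grid)).foldl
        (fun o ie => o.modify ie.1.toNat (pvUpd grid ie.1 ie.2)) grid := by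
    simp only [solve_5ad8a7c0]
    rw [pv_rowinfo_eq]
    apply PySem.List.foldl_congr_mem
    intro o ie hmem
    obtain ⟨k, hk, hie⟩ := (PySem.List.mem_enumerate_iff _ _ _).mp hmem
    have hie2 : ie.2 = pvEntry grid (k : Int) := by rw [hie]; simp [pv_infoA_getElem grid k hk]
    have hie1 : ie.1 = (k : Int) := by rw [hie]; simp
    have hfst : ie.2.1 = ie.1 := by rw [hie2, pv_entry_fst, hie1]
    by_cases hneg : ie.2.2.1 < 0
    · rw [if_pos hneg]
      have hud : pvUpd grid ie.1 ie.2 = fun row => row := by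
        funext row; simp [pvUpd, hneg]
      rw [hud, pv_modify_id]
    · rw [if_neg hneg]
      have hfill : ((PySem.List.enumerate (pvInfoA grid)).any (fun je =>
          !(je.1 == ie.1) && decide (je.2.2.1 ≥ 0) && ((je.1 - ie.1).natAbs == 1) &&
            (ie.2.2.2 - ie.2.2.1 == je.2.2.2 - je.2.2.1)))
          = pvFill grid ie.1 (ie.2.2.2 - ie.2.2.1) := rfl
      rw [hfill]
      by_cases hf : pvFill grid ie.1 (ie.2.2.2 - ie.2.2.1) = true
      · rw [if_pos hf, hfst, pv_foldl_modify_same]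
        have hud : pvUpd grid ie.1 ie.2 =
            fun row => (PySem.List.pyRange ie.2.2.1 (ie.2.2.2 + 1) 1).foldl
              (fun row c => row.set c.toNat 2) row := by
          funext row; simp [pvUpd, hneg, hf]
        rw [hud]
      · rw [if_neg hf]
        have hud : pvUpd grid ie.1 ie.2 = fun row => row := by
          funext row; simp [pvUpd, hneg]; intro h; exact absurd h hf
        rw [hud, pv_modify_id]
  rw [hA]
  have hL := pv_foldl_enum_modify (pvUpd grid) (pvInfoA grid) 0 grid p
  norm_num at hL
  rw [hL]
  by_cases hp : p < grid.length
  · rw [dif_pos (by rw [pv_infoA_length] at *; exact hp), dif_pos hp]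
    rw [pv_infoA_getElem grid p (by rw [pv_infoA_length]; exact hp)]
  · rw [dif_neg (by rw [pv_infoA_length]; omega), dif_neg hp]

-- ---------- B side ----------

-- generic first/last fold: the state after the sweep, via the filtered index list
theorem pv_ffl_aux (P : Int × Int → Bool) (l : List (Int × Int)) (f b : Int) :
    l.foldl (fun st cv => if P cv then
        (match st with
        | none => some (cv.1, cv.1)
        | some fl => some (fl.1, cv.1))
      else st) (some (f, b))
    = some (f, ((l.filter P).map (·.1)).getLastD b) := by
  induction l generalizing b with
  | nil => simp
  | cons c t ih =>
      by_cases hc : P c = true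
      · simp only [List.foldl_cons, if_pos hc, List.filter_cons_of_pos hc, List.map_cons,
          List.getLastD_cons]
        exact ih c.1
      · simp only [List.foldl_cons, if_neg hc, List.filter_cons_of_neg (by simpa using hc)]
        exact ih b

theorem pv_ffl (P : Int × Int → Bool) (l : List (Int × Int)) :
    l.foldl (fun st cv => if P cv then
        (match st with
        | none => some (cv.1, cv.1)
        | some fl => some (fl.1, cv.1))
      else st) none
    = if (l.filter P).map (·.1) = [] then none
      else some (((l.filter P).map (·.1)).headD 0, ((l.filter P).map (·.1)).getLastD 0) := by
  induction l with
  | nil => simp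
  | cons c t ih =>
      by_cases hc : P c = true
      · simp only [List.foldl_cons, if_pos hc, List.filter_cons_of_pos hc, List.map_cons]
        rw [pv_ffl_aux, if_neg (by simp)]
        simp only [List.headD_cons, List.getLastD_cons]
      · simp only [List.foldl_cons, if_neg hc,
          List.filter_cons_of_neg (by simpa using hc)]
        exact ih

-- A's position list is the first components of the filtered enumerate of row[:C]
theorem pv_ps_eq (C : Nat) (row : List Int) :
    (PySem.List.pyRange 0 (C : Int) 1).filter (fun c => PySem.List.pyGetD row c 0 == 2)
      = ((PySem.List.enumerate (row.take C)).filter (fun cv => cv.2 == 2)).map (·.1) := by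
  have hM : (row.take C).length = min C row.length := by simp
  rw [PySem.List.enumerate_eq_map_pyRange (row.take C) 0, List.filter_map, List.map_map]
  have hMle : ((min C row.length : Nat) : Int) ≤ (C : Int) := by
    have := Nat.min_le_left C row.length; exact_mod_cast this
  have hsplit := PySem.List.pyRange_one_append 0 ((min C row.length : Nat) : Int) (C : Int)
    (by positivity) hMle
  rw [hsplit, List.filter_append]
  have h2 : (PySem.List.pyRange ((min C row.length : Nat) : Int) (C : Int) 1).filter
      (fun c => PySem.List.pyGetD row c 0 == 2) = [] := by
    rw [List.filter_eq_nil_iff]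
    intro c hc
    have hcb := (PySem.List.mem_pyRange_one).mp hc
    have hlen : (row.length : Int) ≤ c := by
      rcases Nat.lt_or_ge row.length C with h | h
      · have : min C row.length = row.length := by omega
        rw [this] at hcb; exact_mod_cast hcb.1
      · have : ((min C row.length : Nat) : Int) = (C : Int) := by
          have : min C row.length = C := by omega
          exact_mod_cast this
        omega
    obtain ⟨n, rfl⟩ : ∃ n : Nat, c = (n : Int) := ⟨c.toNat, by omega⟩
    have : PySem.List.pyGetD row ((n : Nat) : Int) 0 = 0 := by
      rw [PySem.List.pyGetD_natCast]
      apply List.getD_eq_default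
      exact_mod_cast hlen
    simp [this]
  rw [h2, List.append_nil]
  have hlen2 : ((row.take C).length : Int) = ((min C row.length : Nat) : Int) := by
    exact_mod_cast hM
  have hlen3 : PySem.List.len (row.take C) = ((min C row.length : Nat) : Int) := by
    rw [PySem.List.len_eq]; exact hlen2
  rw [hlen3]
  simp only [Function.comp_def]
  rw [show (List.map (fun j => j)
      (List.filter (fun j => PySem.List.pyGetD (List.take C row) j 0 == 2)
        (PySem.List.pyRange 0 ((min C row.length : Nat) : Int) 1)))
    = (List.filter (fun j => PySem.List.pyGetD (List.take C row) j 0 == 2)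
        (PySem.List.pyRange 0 ((min C row.length : Nat) : Int) 1)) from List.map_id' _]
  apply List.filter_congr
  intro c hc
  have hcb := (PySem.List.mem_pyRange_one).mp hc
  obtain ⟨n, rfl⟩ : ∃ n : Nat, c = (n : Int) := ⟨c.toNat, by omega⟩
  have hn : n < (row.take C).length := by
    rw [hM]; exact_mod_cast hcb.2
  have hn2 : n < row.length := by rw [hM] at hn; omega
  simp only [PySem.List.pyGetD_natCast]
  rw [List.getD_eq_getElem _ _ hn, List.getD_eq_getElem _ _ hn2]
  congr 1
  simp [List.getElem_take]

-- filters of a strictly increasing list: head ≠ last iff at least two elements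
theorem pv_scan_eq_span (C : Nat) (row : List Int) : pvB_scan C row = pvB_span C row := by
  unfold pvB_scan pvB_span
  have hslice : PySem.List.slice row none (some (C : Int)) = row.take C :=
    PySem.List.slice_to_natCast row C
  rw [hslice, pv_ffl]
  set ps := (PySem.List.pyRange 0 (C : Int) 1).filter
    (fun c => PySem.List.pyGetD row c 0 == 2) with hps
  have hpe : ((row.take C |> PySem.List.enumerate).filter (fun cv => cv.2 == 2)).map (·.1) = ps :=
    (pv_ps_eq C row).symm
  rw [hpe]
  have hpw : ps.Pairwise (· < ·) := by
    rw [hps]; exact (PySem.List.pairwise_lt_pyRange_one 0 (C : Int)).filter _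
  rcases ps with _ | ⟨x, _ | ⟨y, t⟩⟩
  · simp
  · simp
  · have hlast : (y :: t).getLastD x ∈ y :: t := by
      rw [List.getLastD_eq_getLast?, List.getLast?_eq_some_getLast (by simp)]
      exact List.getLast_mem (by simp)
    have hlt : x < (y :: t).getLastD x := by
      rcases List.pairwise_cons.mp hpw with ⟨hall, _⟩
      exact hall _ hlast
    have hlt2 : x < t.getLastD y := by rwa [List.getLastD_cons] at hlt
    have hne : (x != t.getLastD y) = true := by
      simp only [bne_iff_ne, ne_eq]
      omega
    have hlen : (x :: y :: t).length ≥ 2 := by simp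
    rw [if_neg (by simp), if_pos hlen]
    simp only [List.headD_cons, List.getLastD_cons, hne, if_true]

-- the spans list B builds is A's spans, row by row
def pvSpans (grid : List (List Int)) : List (Option (Int × Int)) :=
  grid.map (pvB_span (PySem.List.pyGetD grid 0 []).length)

-- the pair condition of B's marking pass
def pvCond (spans : List (Option (Int × Int))) (i : Int) : Bool :=
  match PySem.List.pyGetD spans i none, PySem.List.pyGetD spans (i + 1) none with
  | some a, some b => a.2 - a.1 == b.2 - b.1
  | _, _ => false

def pvMarks (grid : List (List Int)) : List Bool :=
  (PySem.List.pyRange 0 ((grid.length : Int) - 1) 1).foldl (fun m i =>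
    if pvCond (pvSpans grid) i then (m.set i.toNat true).set (i.toNat + 1) true else m)
    (List.replicate grid.length false)

-- what B does to one row
def pvBRow (grid : List (List Int)) (i : Int) (row : List Int) : List Int :=
  if PySem.List.pyGetD (pvMarks grid) i false then
    match PySem.List.pyGetD (pvSpans grid) i none with
    | some lr => (PySem.List.enumerate row).map
        (fun cv => if lr.1 ≤ cv.1 ∧ cv.1 ≤ lr.2 then (2 : Int) else cv.2)
    | none => row
  else row

theorem pv_setset_getElem? (m : List Bool) (a b p : Nat) :
    ((m.set a true).set b true)[p]? = m[p]?.map (fun v => v || (a == p || b == p)) := by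
  by_cases hp : p < m.length
  · rw [List.getElem?_eq_getElem hp]
    have hp1 : p < (m.set a true).length := by simpa using hp
    have hp2 : p < ((m.set a true).set b true).length := by simpa using hp
    rw [List.getElem?_eq_getElem hp2]
    simp only [Option.map_some, Option.some.injEq]
    rw [List.getElem_set, List.getElem_set]
    by_cases hb : b = p
    · simp [hb]
    · by_cases ha : a = p <;> simp [ha, hb]
  · have h1 : m[p]? = none := List.getElem?_eq_none_iff.mpr (by omega)
    have h2 : ((m.set a true).set b true)[p]? = none :=
      List.getElem?_eq_none_iff.mpr (by simpa using (by omega : m.length ≤ p))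
    simp [h1, h2]

theorem pv_marks_fold_getElem? (cond : Int → Bool) (cs : List Int) (m : List Bool) (p : Nat) :
    (cs.foldl (fun m i => if cond i then (m.set i.toNat true).set (i.toNat + 1) true else m) m)[p]?
      = m[p]?.map (fun v => v || cs.any (fun i => cond i && (i.toNat == p || i.toNat + 1 == p))) := by
  induction cs generalizing m with
  | nil => simp
  | cons c t ih =>
      simp only [List.foldl_cons, List.any_cons]
      by_cases hc : cond c = true
      · rw [if_pos hc, ih, pv_setset_getElem?]
        cases hx : m[p]? <;> simp [hx, hc, Bool.or_assoc]
      · rw [if_neg hc, ih]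
        cases hx : m[p]? <;> simp [hx, hc]

theorem pv_marks_lookup (grid : List (List Int)) (p : Nat) (hp : p < grid.length) :
    PySem.List.pyGetD (pvMarks grid) (p : Int) false
      = (PySem.List.pyRange 0 ((grid.length : Int) - 1) 1).any
          (fun i => pvCond (pvSpans grid) i && (i.toNat == p || i.toNat + 1 == p)) := by
  have h := pv_marks_fold_getElem? (pvCond (pvSpans grid))
    (PySem.List.pyRange 0 ((grid.length : Int) - 1) 1) (List.replicate grid.length false) p
  have hrep : (List.replicate grid.length false)[p]? = some false := by
    simp [List.getElem?_replicate, hp]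
  rw [hrep] at h
  simp only [Option.map_some, List.getElem_replicate] at h
  rw [PySem.List.pyGetD_natCast, List.getD_eq_getElem?_getD]
  unfold pvMarks
  rw [h]
  simp

theorem pv_span_lookup (grid : List (List Int)) (k : Nat) (hk : k < grid.length) :
    PySem.List.pyGetD (pvSpans grid) (k : Int) none
      = pvB_span (PySem.List.pyGetD grid 0 []).length grid[k] := by
  unfold pvSpans
  rw [PySem.List.pyGetD_natCast, List.getD_eq_getElem?_getD, List.getElem?_map,
    List.getElem?_eq_getElem hk]
  rfl

-- entry ↔ span on a valid row index
theorem pv_entry_of_span (grid : List (List Int)) (k : Nat) (hk : k < grid.length) :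
    pvEntry grid (k : Int)
      = match pvB_span (PySem.List.pyGetD grid 0 []).length grid[k] with
        | some lr => ((k : Int), lr.1, lr.2)
        | none => ((k : Int), -1, -1) := by
  unfold pvEntry
  have hg : PySem.List.pyGetD grid (k : Int) [] = grid[k] := by
    rw [PySem.List.pyGetD_natCast, List.getD_eq_getElem?_getD, List.getElem?_eq_getElem hk]
    rfl
  rw [hg]

-- the marking pass computes exactly A's fill flag (span present) and false (span absent)
theorem pv_guard_eq (grid : List (List Int)) (p : Nat) (hp : p < grid.length) :
    PySem.List.pyGetD (pvMarks grid) (p : Int) false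
      = (match pvB_span (PySem.List.pyGetD grid 0 []).length grid[p] with
         | some lr => pvFill grid (p : Int) (lr.2 - lr.1)
         | none => false) := by
  rw [pv_marks_lookup grid p hp]
  rw [Bool.eq_iff_iff, List.any_eq_true]
  constructor
  · rintro ⟨i, hi, hpred⟩
    have hib := (PySem.List.mem_pyRange_one).mp hi
    simp only [Bool.and_eq_true, Bool.or_eq_true, beq_iff_eq] at hpred
    obtain ⟨hcond, hadj⟩ := hpred
    -- the two row indices of the matched pair
    have hitn : (i : Int) = (i.toNat : Int) := by omega
    have hk1 : i.toNat < grid.length := by omega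
    have hk2 : i.toNat + 1 < grid.length := by omega
    unfold pvCond at hcond
    rw [hitn] at hcond
    have hadd : ((i.toNat : Int)) + 1 = ((i.toNat + 1 : Nat) : Int) := by push_cast; ring
    rw [hadd, pv_span_lookup grid i.toNat hk1, pv_span_lookup grid (i.toNat + 1) hk2] at hcond
    rcases hsa : pvB_span (PySem.List.pyGetD grid 0 []).length grid[i.toNat] with _ | a
    · rw [hsa] at hcond; exact absurd hcond (by simp)
    rcases hsb : pvB_span (PySem.List.pyGetD grid 0 []).length grid[i.toNat + 1] with _ | b
    · rw [hsa, hsb] at hcond; exact absurd hcond (by simp)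
    rw [hsa, hsb] at hcond
    simp only [beq_iff_eq] at hcond
    -- p is one endpoint of the pair; q the other
    rcases hadj with hcase | hcase
    · -- i.toNat = p : neighbour is p+1 with span b
      have hpp : i.toNat = p := hcase
      subst hpp
      rw [hsa]
      have hla := pv_span_nonneg _ _ _ _ hsb
      refine List.any_eq_true.mpr ?_
      refine ⟨(((i.toNat + 1 : Nat) : Int), pvEntry grid (((i.toNat + 1 : Nat) : Int))),
        (PySem.List.mem_enumerate_iff _ _ _).mpr ⟨i.toNat + 1,
          (by rw [pv_infoA_length]; exact hk2),
          by rw [pv_infoA_getElem grid _ (by rw [pv_infoA_length]; exact hk2)]; simp⟩, ?_⟩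
      rw [pv_entry_of_span grid (i.toNat + 1) hk2, hsb]
      simp only [Bool.and_eq_true, bne_iff_ne, ne_eq, decide_eq_true_eq, beq_iff_eq,
        Bool.not_eq_eq_eq_not, Bool.not_true, beq_eq_false_iff_ne]
      refine ⟨⟨⟨by push_cast; omega, hla.1⟩, by push_cast; simp⟩, hcond⟩
    · -- i.toNat + 1 = p : neighbour is p-1 = i.toNat with span a
      have hpp : i.toNat + 1 = p := hcase
      subst hpp
      rw [hsb]
      have hla := pv_span_nonneg _ _ _ _ hsa
      refine List.any_eq_true.mpr ?_
      refine ⟨(((i.toNat : Nat) : Int), pvEntry grid ((i.toNat : Int))),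
        (PySem.List.mem_enumerate_iff _ _ _).mpr ⟨i.toNat,
          (by rw [pv_infoA_length]; exact hk1),
          by rw [pv_infoA_getElem grid _ (by rw [pv_infoA_length]; exact hk1)]; simp⟩, ?_⟩
      rw [pv_entry_of_span grid i.toNat hk1, hsa]
      simp only [Bool.and_eq_true, bne_iff_ne, ne_eq, decide_eq_true_eq, beq_iff_eq,
        Bool.not_eq_eq_eq_not, Bool.not_true, beq_eq_false_iff_ne]
      refine ⟨⟨⟨by push_cast; omega, hla.1⟩, by push_cast; simp⟩, hcond.symm⟩
  · intro h
    rcases hsp : pvB_span (PySem.List.pyGetD grid 0 []).length grid[p] with _ | lr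
    · rw [hsp] at h; exact absurd h (by simp)
    rw [hsp] at h
    obtain ⟨x, hx, hpred⟩ := List.any_eq_true.mp h
    obtain ⟨k, hk, rfl⟩ := (PySem.List.mem_enumerate_iff _ _ _).mp hx
    rw [pv_infoA_length] at hk
    rw [pv_infoA_getElem grid k (by rw [pv_infoA_length]; exact hk)] at hpred
    simp only [Bool.and_eq_true, bne_iff_ne, decide_eq_true_eq, beq_iff_eq,
      Bool.not_eq_eq_eq_not, Bool.not_true, beq_eq_false_iff_ne, ne_eq, zero_add,
      pv_entry_fst] at hpred
    obtain ⟨⟨⟨hne, hge⟩, habs⟩, hgap⟩ := hpred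
    -- the neighbour k has a span (its entry's left is ≥ 0)
    rcases hsk : pvB_span (PySem.List.pyGetD grid 0 []).length grid[k] with _ | b
    · rw [pv_entry_of_span grid k hk, hsk] at hge; simp at hge
    have hgapk : (pvEntry grid (k : Int)).2.2 - (pvEntry grid (k : Int)).2.1 = b.2 - b.1 := by
      rw [pv_entry_of_span grid k hk, hsk]
    rw [hgapk] at hgap
    -- i of the marking pass is min k p
    have hcase : k + 1 = p ∨ p + 1 = k := by omega
    rcases hcase with hc | hc
    · subst hc
      refine ⟨(k : Int), (PySem.List.mem_pyRange_one).mpr ⟨by omega, by omega⟩, ?_⟩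
      have hcond : pvCond (pvSpans grid) (k : Int) = true := by
        unfold pvCond
        have hadd : ((k : Int)) + 1 = ((k + 1 : Nat) : Int) := by push_cast; ring
        rw [hadd, pv_span_lookup grid k hk, pv_span_lookup grid (k + 1) (by omega), hsk, hsp]
        simp only [beq_iff_eq]; omega
      simp [hcond]
    · subst hc
      refine ⟨(p : Int), (PySem.List.mem_pyRange_one).mpr ⟨by omega, by omega⟩, ?_⟩
      have hcond : pvCond (pvSpans grid) (p : Int) = true := by
        unfold pvCond
        have hadd : ((p : Int)) + 1 = ((p + 1 : Nat) : Int) := by push_cast; ring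
        rw [hadd, pv_span_lookup grid p hp, pv_span_lookup grid (p + 1) (by omega), hsp, hsk]
        simp only [beq_iff_eq]; omega
      simp [hcond]

-- B's program, row by row
theorem pv_B_getElem? (grid : List (List Int)) (p : Nat) :
    (solve_5ad8a7c0_alt grid)[p]? = grid[p]?.map (fun row => pvBRow grid (p : Int) row) := by
  have hspans : grid.foldl (fun acc row =>
      acc ++ [pvB_scan (PySem.List.pyGetD grid 0 []).length row]) [] = pvSpans grid := by
    rw [PySem.List.foldl_append_singleton_eq_map]
    unfold pvSpans
    exact List.map_congr_left (fun row _ => pv_scan_eq_span _ row)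
  have hstep : (fun (m : List Bool) (i : Int) =>
      match PySem.List.pyGetD (pvSpans grid) i none,
            PySem.List.pyGetD (pvSpans grid) (i + 1) none with
      | some a, some b =>
          if a.2 - a.1 == b.2 - b.1 then (m.set i.toNat true).set (i.toNat + 1) true else m
      | _, _ => m)
      = (fun m i => if pvCond (pvSpans grid) i
          then (m.set i.toNat true).set (i.toNat + 1) true else m) := by
    funext m i
    unfold pvCond
    rcases PySem.List.pyGetD (pvSpans grid) i none with _ | a <;>
      rcases PySem.List.pyGetD (pvSpans grid) (i + 1) none with _ | b <;> simp
  have hB : solve_5ad8a7c0_alt grid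
      = (PySem.List.enumerate grid).foldl
          (fun out ir => out ++ [pvBRow grid ir.1 ir.2]) [] := by
    simp only [solve_5ad8a7c0_alt]
    rw [hspans, hstep]
    have hmarks : ((PySem.List.pyRange 0 ((grid.length : Int) - 1) 1).foldl
        (fun m i => if pvCond (pvSpans grid) i
          then (m.set i.toNat true).set (i.toNat + 1) true else m)
        (List.replicate grid.length false)) = pvMarks grid := rfl
    rw [hmarks]
    apply PySem.List.foldl_congr_mem
    intro out ir _
    unfold pvBRow
    by_cases hm : PySem.List.pyGetD (pvMarks grid) ir.1 false = true
    · rw [if_pos hm, if_pos hm]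
      rcases PySem.List.pyGetD (pvSpans grid) ir.1 none with _ | lr <;> rfl
    · rw [if_neg hm, if_neg hm]
  rw [hB, PySem.List.foldl_append_singleton_eq_map, List.nil_append, List.getElem?_map,
    PySem.List.getElem?_enumerate]
  cases grid[p]? <;> simp

-- A's fill of a row equals B's comprehension
theorem pv_foldl_set_getElem? (cs : List Int) (h : ∀ c ∈ cs, 0 ≤ c) (row : List Int) (p : Nat) :
    (cs.foldl (fun row c => row.set c.toNat 2) row)[p]? =
      if (p : Int) ∈ cs then row[p]?.map (fun _ => (2 : Int)) else row[p]? := by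
  induction cs generalizing row with
  | nil => simp
  | cons c t ih =>
      have hc : 0 ≤ c := h c (by simp)
      simp only [List.foldl_cons]
      rw [ih (fun x hx => h x (by simp [hx]))]
      by_cases hm : (p : Int) ∈ t
      · rw [if_pos hm, if_pos (by simp [hm])]
        simp [List.getElem?_set]
        by_cases he : c.toNat = p
        · simp [he]
          cases hrp : row[p]? with
          | none => simp [List.getElem?_eq_none_iff.mp hrp, hrp]
          | some v =>
              have := (List.getElem?_eq_some_iff.mp hrp).1
              simp [this, hrp]
        · simp [he]
      · rw [if_neg hm]
        by_cases he : c = (p : Int)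
        · rw [if_pos (by simp [he])]
          have : c.toNat = p := by omega
          simp [List.getElem?_set, this]
          cases hrp : row[p]? with
          | none => simp [List.getElem?_eq_none_iff.mp hrp, hrp]
          | some v =>
              have := (List.getElem?_eq_some_iff.mp hrp).1
              simp [this, hrp]
        · rw [if_neg (by simp [hm, he, Ne.symm])]
          have : c.toNat ≠ p := by omega
          simp [List.getElem?_set, this]

theorem pv_fillRow_eq (l rt : Int) (hl : 0 ≤ l) (row : List Int) :
    (PySem.List.pyRange l (rt + 1) 1).foldl (fun row c => row.set c.toNat 2) row
      = (PySem.List.enumerate row).map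
          (fun cx => if l ≤ cx.1 ∧ cx.1 ≤ rt then (2 : Int) else cx.2) := by
  apply List.ext_getElem?
  intro p
  rw [pv_foldl_set_getElem? _ (fun c hc => le_trans hl ((PySem.List.mem_pyRange_one).mp hc).1)]
  rw [List.getElem?_map, PySem.List.getElem?_enumerate]
  by_cases hm : (p : Int) ∈ PySem.List.pyRange l (rt + 1) 1
  · rw [if_pos hm]
    have := (PySem.List.mem_pyRange_one).mp hm
    cases row[p]? <;> simp <;> omega
  · rw [if_neg hm]
    have : ¬ (l ≤ (p : Int) ∧ (p : Int) ≤ rt) := by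
      intro hc
      exact hm ((PySem.List.mem_pyRange_one).mpr ⟨hc.1, by omega⟩)
    cases row[p]? <;> simp [this]

theorem pv_row_eq (grid : List (List Int)) (p : Nat) (hp : p < grid.length) :
    pvUpd grid (p : Int) (pvEntry grid (p : Int)) grid[p] = pvBRow grid (p : Int) grid[p] := by
  unfold pvBRow
  rw [pv_guard_eq grid p hp, pv_span_lookup grid p hp]
  rcases hs : pvB_span (PySem.List.pyGetD grid 0 []).length grid[p] with _ | lr
  · simp only [pvUpd, pv_entry_of_span grid p hp, hs]
    norm_num
  · have hl := (pv_span_nonneg _ _ _ _ hs).1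
    simp only [pvUpd, pv_entry_of_span grid p hp, hs]
    by_cases hf : pvFill grid (p : Int) (lr.2 - lr.1) = true
    · rw [if_neg (by simp; omega), if_pos hf, if_pos hf]
      exact pv_fillRow_eq lr.1 lr.2 hl grid[p]
    · rw [if_neg (by simp; omega), if_neg hf, if_neg hf]

theorem pv_main (grid : List (List Int)) : solve_5ad8a7c0 grid = solve_5ad8a7c0_alt grid := by
  apply List.ext_getElem?
  intro p
  rw [pv_A_getElem?, pv_B_getElem?]
  by_cases hp : p < grid.length
  · rw [dif_pos hp]
    rw [List.getElem?_eq_getElem hp]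
    simp only [Option.map_some]
    rw [pv_row_eq grid p hp]
  · rw [dif_neg hp]
    have : grid[p]? = none := List.getElem?_eq_none_iff.mpr (by omega)
    simp [this]

-- ===== VERDICT (by name: the statement is the Claim_ definition above) =====
theorem solve_5ad8a7c0_spec : Claim_equal_solve_5ad8a7c0 := by
  intro grid _ _
  unfold Spec_solve_5ad8a7c0
  exact pv_main grid
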